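-- pv_equiv track=rewrite | github.com/dariapavlova02/hybrid-sanctions-search-engine | src/ai_service/layers/normalization/processors/token_processor.py | _preserve_hyphenated_case
-- ===== SOURCE A (Python) =====
-- from typing import Dict, List, Set, Tuple, Optional, Any
--
-- def _preserve_hyphenated_case(tokens: List[str], traces: List[str]) -> List[str]:
--     """Preserve proper case in hyphenated names."""
--     processed = []
--     for token in tokens:
--         if '-' in token and len(token) > 1:
--             # Capitalize each part after hyphen
--             parts = token.split('-')
--             capitalized_parts = []
--             for part in parts:
--                 if part and part[0].islower():
--                     capitalized_parts.append(part[0].upper() + part[1:])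
--                 else:
--                     capitalized_parts.append(part)
--             capitalized = '-'.join(capitalized_parts)
--             if capitalized != token:
--                 processed.append(capitalized)
--                 traces.append(f"Preserved hyphenated case: '{token}' → '{capitalized}'")
--             else:
--                 processed.append(token)
--         else:
--             processed.append(token)
--     return processed
-- ===== SOURCE B (Python) =====
-- def _cap(token):
--     """Rebuild token, uppercasing each char whose predecessor (with a virtual
--     leading '-') is '-' and which is lowercase: the part-start positions."""
--     return ''.join(c.upper() if p == '-' and c.islower() else c
--                    for p, c in zip('-' + token, token))
--
-- def _preserve_hyphenated_case(tokens, traces):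
--     """Preserve proper case in hyphenated names (zip-with-previous pass, staged)."""
--     out = [_cap(t) if '-' in t and len(t) > 1 else t for t in tokens]
--     traces.extend(f"Preserved hyphenated case: '{t}' → '{c}'"
--                   for t, c in zip(tokens, out) if c != t)
--     return out
-- ===== Notes on version B (the rewrite author's own statement) =====
-- stated objective: alternative
-- what changed: Replaces split('-')/per-part capitalization/'-'.join inside an accumulating loop with a staged comprehension: each token is rebuilt by zipping it with its predecessor characters (virtual leading '-') and uppercasing the lowercase chars that follow a hyphen; traces are extended afterwards from the tokens/out zip.
import Mathlib
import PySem

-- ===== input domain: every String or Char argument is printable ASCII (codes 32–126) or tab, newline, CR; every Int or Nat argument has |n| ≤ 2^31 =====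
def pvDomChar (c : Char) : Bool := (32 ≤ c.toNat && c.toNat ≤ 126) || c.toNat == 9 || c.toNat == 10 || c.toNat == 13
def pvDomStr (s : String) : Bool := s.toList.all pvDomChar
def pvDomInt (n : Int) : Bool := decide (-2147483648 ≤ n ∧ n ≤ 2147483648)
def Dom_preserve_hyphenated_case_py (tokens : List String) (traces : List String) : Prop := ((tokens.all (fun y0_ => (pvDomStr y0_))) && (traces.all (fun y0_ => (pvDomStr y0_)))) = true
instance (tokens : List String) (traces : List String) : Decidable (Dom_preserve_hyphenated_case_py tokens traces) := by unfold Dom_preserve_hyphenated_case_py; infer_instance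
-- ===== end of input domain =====

-- B rebuilds each hyphenated token by zipping it with its predecessor characters and
-- uppercasing lowercase chars after a hyphen, instead of A's split/'-'.join loop; same
-- return value. Both Pythons also append the same trace strings to `traces` in place
-- (B in a staged pass, producing the same final list); equivalence here is about the
-- returned list.

-- ===== PORT A =====
-- `if part and part[0].islower(): part[0].upper() + part[1:] else: part`
def pvCapPartA : List Char → List Char
  | [] => []
  | c :: rest => if PySem.Chars.islower c then PySem.Chars.upperChar c :: rest else c :: rest

def pvProcTokA (token : String) : String :=
  let cs := token.toList
  if PySem.Chars.isIn ['-'] cs && decide (cs.length > 1) then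
    let parts := PySem.Chars.splitOn cs ['-']
    let capParts := parts.foldl (fun acc part => acc ++ [pvCapPartA part]) []
    let capitalized := PySem.Chars.join ['-'] capParts
    if capitalized ≠ cs then String.ofList capitalized else token
  else token

def preserve_hyphenated_case_py (tokens : List String) (traces : List String) : List String :=
  tokens.foldl (fun processed token => processed ++ [pvProcTokA token]) []

-- ===== PORT B =====
-- `''.join(c.upper() if p == '-' and c.islower() else c for p, c in zip('-' + token, token))`
def pvCapB (cs : List Char) : List Char :=
  (('-' :: cs).zip cs).map
    (fun pc => if pc.1 == '-' && PySem.Chars.islower pc.2 then PySem.Chars.upperChar pc.2 else pc.2)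

-- `[_cap(t) if '-' in t and len(t) > 1 else t for t in tokens]`
def preserve_hyphenated_case_py_alt (tokens : List String) (traces : List String) : List String :=
  tokens.map (fun t =>
    if PySem.Chars.isIn ['-'] t.toList && decide (t.toList.length > 1) then
      String.ofList (pvCapB t.toList)
    else t)

-- ===== PRECONDITION & SPEC =====
def Spec_preserve_hyphenated_case_py (tokens : List String) (traces : List String) (out : List String) : Prop := out = preserve_hyphenated_case_py_alt tokens traces
instance (tokens : List String) (traces : List String) (out : List String) : Decidable (Spec_preserve_hyphenated_case_py tokens traces out) := by unfold Spec_preserve_hyphenated_case_py; infer_instance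

-- ===== CLAIM (what is proved, stated in full; the proofs are below) =====
def Claim_equal_preserve_hyphenated_case_py : Prop := ∀ (tokens : List String) (traces : List String), Dom_preserve_hyphenated_case_py tokens traces → Spec_preserve_hyphenated_case_py tokens traces (preserve_hyphenated_case_py tokens traces)

-- ===== LEMMAS AND PROOFS =====

-- proof-only bridge: left-to-right scan carrying "previous char was '-'"
def pvScan : List Char → Bool → List Char
  | [], _ => []
  | c :: rest, start =>
    (if start && PySem.Chars.islower c then PySem.Chars.upperChar c else c) :: pvScan rest (c == '-')

theorem pvCapB_eq_scan (cs : List Char) : ∀ p : Char,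
    ((p :: cs).zip cs).map
      (fun pc => if pc.1 == '-' && PySem.Chars.islower pc.2 then PySem.Chars.upperChar pc.2 else pc.2)
      = pvScan cs (p == '-') := by
  induction cs with
  | nil => intro p; simp [pvScan]
  | cons c rest ih =>
    intro p
    rw [List.zip_cons_cons, List.map_cons, ih c]
    rfl

-- reference splitter: pvSplit pre l = parts of (pre ++ l) where pre contains no '-'
def pvSplit (pre : List Char) : List Char → List (List Char)
  | [] => [pre]
  | c :: rest => if c = '-' then pre :: pvSplit [] rest else pvSplit (pre ++ [c]) rest

theorem pvSplit_go_spec (sep : List Char) (hsep : sep = ['-']) :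
    ∀ (fuel : Nat) (l cur : List Char) (acc : List (List Char)), l.length < fuel →
      PySem.Chars.splitOn.go sep fuel l cur acc
        = acc.reverse ++ pvSplit cur.reverse l := by
  subst hsep
  intro fuel
  induction fuel with
  | zero => intro l cur acc h; omega
  | succ n ih =>
    intro l cur acc h
    cases l with
    | nil => simp [PySem.Chars.splitOn.go, pvSplit]
    | cons c rest =>
      simp only [PySem.Chars.splitOn.go, List.isPrefixOf]
      by_cases hc : c = '-'
      · subst hc
        simp only [beq_self_eq_true, Bool.true_and, if_pos, List.length_cons,
          List.drop_succ_cons, List.drop_zero, List.length_nil]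
        rw [ih rest [] (List.reverse cur :: acc) (by simp at h ⊢; omega)]
        simp [pvSplit]
      · have hne : ('-' == c) = false := by
          simp [beq_eq_false_iff_ne]; exact fun hh => hc hh.symm
        simp only [hne, Bool.false_and, Bool.false_eq_true, if_false]
        rw [ih rest (c :: cur) acc (by simp at h ⊢; omega)]
        simp [pvSplit, hc]

theorem pvSplitOn_eq (cs : List Char) :
    PySem.Chars.splitOn cs ['-'] = pvSplit [] cs := by
  show PySem.Chars.splitOn.go ['-'] (cs.length + 1) cs [] [] = pvSplit [] cs
  rw [pvSplit_go_spec ['-'] rfl (cs.length + 1) cs [] [] (by omega)]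
  rfl

theorem pvSplit_pre (l : List Char) : ∀ pre : List Char,
    pvSplit pre l = (pre ++ (pvSplit [] l).headI) :: (pvSplit [] l).tail := by
  induction l with
  | nil => intro pre; simp [pvSplit]
  | cons c rest ih =>
    intro pre
    by_cases hc : c = '-'
    · subst hc; simp [pvSplit]
    · simp only [pvSplit, if_neg hc]
      rw [ih (pre ++ [c])]
      simp only [List.nil_append]
      rw [ih [c]]
      simp

theorem pvFoldl_map {α β : Type} (f : α → β) (l : List α) : ∀ acc : List β,
    l.foldl (fun acc x => acc ++ [f x]) acc = acc ++ l.map f := by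
  induction l with
  | nil => intro acc; simp
  | cons x xs ih => intro acc; simp [List.foldl, ih]

-- join over a cons-headed first part peels one character
theorem pvJoin_cons_head (a : Char) (p : List Char) (ps : List (List Char)) :
    PySem.Chars.join ['-'] ((a :: p) :: ps) = a :: PySem.Chars.join ['-'] (p :: ps) := by
  cases ps with
  | nil => simp [PySem.Chars.join_singleton]
  | cons q qs => rw [PySem.Chars.join_cons_cons, PySem.Chars.join_cons_cons]; simp

theorem pvMain (l : List Char) :
    PySem.Chars.join ['-'] ((pvSplit [] l).map pvCapPartA) = pvScan l true
    ∧ PySem.Chars.join ['-'] ((pvSplit [] l).headI :: ((pvSplit [] l).tail).map pvCapPartA)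
        = pvScan l false := by
  induction l with
  | nil => simp [pvSplit, pvScan, PySem.Chars.join_singleton, pvCapPartA]
  | cons c rest ih =>
    obtain ⟨ihT, ihF⟩ := ih
    by_cases hc : c = '-'
    · subst hc
      have hsplit : pvSplit [] ('-' :: rest) = [] :: pvSplit [] rest := by simp [pvSplit]
      have hcons : pvSplit [] rest = (pvSplit [] rest).headI :: (pvSplit [] rest).tail := by
        have := pvSplit_pre rest []; simpa using this
      have hlow : PySem.Chars.islower '-' = false := by decide
      have key : PySem.Chars.join ['-'] ([] :: (pvSplit [] rest).map pvCapPartA)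
          = '-' :: pvScan rest true := by
        rw [hcons, List.map_cons, PySem.Chars.join_cons_cons]
        rw [← List.map_cons, ← hcons, ihT]
        simp
      constructor
      · rw [hsplit]
        simp only [List.map_cons, pvCapPartA]
        rw [key]
        simp [pvScan, hlow]
      · rw [hsplit]
        simp only [List.headI_cons, List.tail_cons]
        rw [key]
        simp [pvScan, hlow]
    · have hsplit : pvSplit [] (c :: rest)
          = (c :: (pvSplit [] rest).headI) :: (pvSplit [] rest).tail := by
        simp only [pvSplit, if_neg hc]
        have := pvSplit_pre rest [c]; simpa using this
      have hbeq : (c == '-') = false := by simp [hc]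
      constructor
      · rw [hsplit, List.map_cons]
        have hcap : pvCapPartA (c :: (pvSplit [] rest).headI)
            = (if PySem.Chars.islower c then PySem.Chars.upperChar c else c)
              :: (pvSplit [] rest).headI := by
          simp only [pvCapPartA]; split_ifs <;> rfl
        rw [hcap, pvJoin_cons_head, ihF]
        simp [pvScan, hbeq]
      · rw [hsplit]
        simp only [List.headI_cons, List.tail_cons]
        rw [pvJoin_cons_head, ihF]
        simp [pvScan, hbeq]

theorem pvProcTok_eq (token : String) :
    pvProcTokA token
      = (if PySem.Chars.isIn ['-'] token.toList && decide (token.toList.length > 1) then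
          String.ofList (pvCapB token.toList)
        else token) := by
  simp only [pvProcTokA]
  by_cases hg : (PySem.Chars.isIn ['-'] token.toList && decide (token.toList.length > 1)) = true
  · simp only [hg, if_pos]
    have hcap : PySem.Chars.join ['-']
        ((PySem.Chars.splitOn token.toList ['-']).foldl (fun acc part => acc ++ [pvCapPartA part]) [])
        = pvCapB token.toList := by
      rw [pvSplitOn_eq, pvFoldl_map, List.nil_append, (pvMain token.toList).1,
        pvCapB, pvCapB_eq_scan]
      rfl
    rw [hcap]
    by_cases he : pvCapB token.toList = token.toList
    · simp only [he, ne_eq, not_true_eq_false, if_false]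
      simp [String.ofList]
    · simp only [ne_eq, he, not_false_eq_true, if_true]
  · simp only [Bool.not_eq_true] at hg
    simp only [hg, Bool.false_eq_true, if_false]

-- ===== VERDICT (by name: the statement is the Claim_ definition above) =====
theorem preserve_hyphenated_case_py_spec : Claim_equal_preserve_hyphenated_case_py := by
  intro tokens traces _
  show preserve_hyphenated_case_py tokens traces = preserve_hyphenated_case_py_alt tokens traces
  simp only [preserve_hyphenated_case_py, preserve_hyphenated_case_py_alt,
    pvFoldl_map, List.nil_append]
  exact List.map_congr_left (fun t _ => pvProcTok_eq t)
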